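-- pv_equiv track=rewrite | github.com/ragardner/tksheet | tksheet/functions.py | gen_coords
-- ===== SOURCE A (Python) =====
-- from collections.abc import Callable, Generator, Hashable, Iterable, Iterator, Sequence
--
-- def gen_coords(
--     start_row: int,
--     start_col: int,
--     end_row: int,
--     end_col: int,
--     reverse: bool = False,
-- ) -> Generator[tuple[int, int]]:
--     if reverse:
--         for r in reversed(range(start_row, end_row)):
--             for c in reversed(range(start_col, end_col)):
--                 yield (r, c)
--     else:
--         for r in range(start_row, end_row):
--             for c in range(start_col, end_col):
--                 yield (r, c)
-- ===== SOURCE B (Python) =====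
-- def gen_coords(
--     start_row: int,
--     start_col: int,
--     end_row: int,
--     end_col: int,
--     reverse: bool = False,
-- ):
--     rows = max(0, end_row - start_row)
--     cols = max(0, end_col - start_col)
--     total = rows * cols
--     idxs = reversed(range(total)) if reverse else range(total)
--     for i in idxs:
--         r, c = divmod(i, cols)
--         yield (start_row + r, start_col + c)
-- ===== Notes on version B (the rewrite author's own statement) =====
-- stated objective: alternative
-- what changed: Replaces the two nested row/column loops by one flat loop over a single linear index that is decoded into (row, col) with divmod; degenerate/empty ranges fall out of total == 0 with no special case.
import Mathlib
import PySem

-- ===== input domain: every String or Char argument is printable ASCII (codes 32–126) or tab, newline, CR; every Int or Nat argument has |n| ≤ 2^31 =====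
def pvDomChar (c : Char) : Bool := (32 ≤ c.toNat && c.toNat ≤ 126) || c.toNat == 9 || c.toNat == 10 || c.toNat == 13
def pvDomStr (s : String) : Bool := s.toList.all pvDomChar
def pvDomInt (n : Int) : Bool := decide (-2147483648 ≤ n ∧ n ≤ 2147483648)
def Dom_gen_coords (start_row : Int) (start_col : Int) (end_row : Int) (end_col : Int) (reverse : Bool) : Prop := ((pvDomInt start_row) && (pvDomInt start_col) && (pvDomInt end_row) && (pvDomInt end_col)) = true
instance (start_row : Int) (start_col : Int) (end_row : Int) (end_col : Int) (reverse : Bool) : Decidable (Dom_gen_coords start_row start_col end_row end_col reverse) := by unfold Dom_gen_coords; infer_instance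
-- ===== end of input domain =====

-- B replaces A's two nested row/column loops by one flat loop over a single
-- linear index decoded with divmod (alternative decomposition, same cost).

-- ===== PORT A =====
-- nested for-loops collecting the yields in order (reverse branch first, as in A)
def gen_coords (start_row : Int) (start_col : Int) (end_row : Int) (end_col : Int) (reverse : Bool) : List (Int × Int) :=
  if reverse then
    ((PySem.List.pyRange start_row end_row 1).reverse).foldl
      (fun acc r =>
        ((PySem.List.pyRange start_col end_col 1).reverse).foldl
          (fun acc2 c => acc2 ++ [(r, c)]) acc) []
  else
    (PySem.List.pyRange start_row end_row 1).foldl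
      (fun acc r =>
        (PySem.List.pyRange start_col end_col 1).foldl
          (fun acc2 c => acc2 ++ [(r, c)]) acc) []

-- ===== PORT B =====
-- one flat index loop; divmod decodes the linear index (cols > 0 whenever the loop runs)
def gen_coords_alt (start_row : Int) (start_col : Int) (end_row : Int) (end_col : Int) (reverse : Bool) : List (Int × Int) :=
  let rows := max 0 (end_row - start_row)
  let cols := max 0 (end_col - start_col)
  let total := rows * cols
  let idxs := if reverse then (PySem.List.pyRange 0 total 1).reverse
              else PySem.List.pyRange 0 total 1
  idxs.map (fun i => (start_row + PySem.Int.floordiv i cols, start_col + PySem.Int.mod i cols))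

-- ===== PRECONDITION & SPEC =====
def Spec_gen_coords (start_row : Int) (start_col : Int) (end_row : Int) (end_col : Int) (reverse : Bool) (out : List (Int × Int)) : Prop := out = gen_coords_alt start_row start_col end_row end_col reverse
instance (start_row : Int) (start_col : Int) (end_row : Int) (end_col : Int) (reverse : Bool) (out : List (Int × Int)) : Decidable (Spec_gen_coords start_row start_col end_row end_col reverse out) := by unfold Spec_gen_coords; infer_instance

-- ===== CLAIM (what is proved, stated in full; the proofs are below) =====
def Claim_equal_gen_coords : Prop := ∀ (start_row : Int) (start_col : Int) (end_row : Int) (end_col : Int) (reverse : Bool), Dom_gen_coords start_row start_col end_row end_col reverse → Spec_gen_coords start_row start_col end_row end_col reverse (gen_coords start_row start_col end_row end_col reverse)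

-- ===== LEMMAS AND PROOFS =====

-- A's nested loops compute the flatMap of the row range over the column map
theorem genA_eq_flatMap (sr sc er ec : Int) (rev : Bool) :
    gen_coords sr sc er ec rev =
      if rev then
        ((PySem.List.pyRange sr er 1).reverse).flatMap
          (fun r => ((PySem.List.pyRange sc ec 1).reverse).map (fun c => (r, c)))
      else
        (PySem.List.pyRange sr er 1).flatMap
          (fun r => (PySem.List.pyRange sc ec 1).map (fun c => (r, c))) := by
  unfold gen_coords
  cases rev <;>
    simp only [if_true, if_false, Bool.false_eq_true,
      PySem.List.foldl_append_singleton_eq_map,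
      PySem.List.foldl_append_eq_flatMap, List.nil_append]

-- core index-decoding identity, over Nat
theorem core_decode (sr sc : Int) (R C : Nat) :
    (List.range (R * C)).map
        (fun k => (sr + ((k / C : Nat) : Int), sc + ((k % C : Nat) : Int)))
      = (List.range R).flatMap
          (fun r => (List.range C).map (fun c => (sr + (r : Nat), sc + (c : Nat)))) := by
  induction R with
  | zero => simp
  | succ R ih =>
    have hsplit : (R + 1) * C = R * C + C := by ring
    rw [hsplit, List.range_add, List.map_append, ih, List.range_succ,
      List.flatMap_append]
    congr 1
    simp only [List.flatMap_cons, List.flatMap_nil, List.append_nil, List.map_map]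
    apply List.map_congr_left
    intro c hc
    have hcC : c < C := List.mem_range.mp hc
    have hC : 0 < C := lt_of_le_of_lt (Nat.zero_le c) hcC
    have hdiv : (R * C + c) / C = R := by
      rw [Nat.add_comm, Nat.add_mul_div_right c R hC, Nat.div_eq_of_lt hcC, Nat.zero_add]
    have hmod : (R * C + c) % C = c := by
      rw [Nat.add_comm, Nat.mul_comm, Nat.add_mul_mod_self_left, Nat.mod_eq_of_lt hcC]
    simp only [Function.comp_def]
    rw [hdiv, hmod]

-- forward (reverse = false) case of the equivalence
theorem forward_eq (sr sc er ec : Int) :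
    gen_coords sr sc er ec false = gen_coords_alt sr sc er ec false := by
  rw [genA_eq_flatMap]
  unfold gen_coords_alt
  simp only [Bool.false_eq_true, if_false]
  set R := (er - sr).toNat with hR
  set C := (ec - sc).toNat with hC
  have hrows : max 0 (er - sr) = (R : Int) := by omega
  have hcols : max 0 (ec - sc) = (C : Int) := by omega
  rw [hrows, hcols]
  have htot : (R : Int) * (C : Int) = ((R * C : Nat) : Int) := by push_cast; ring
  rw [htot, PySem.List.pyRange_zero_natCast, PySem.List.pyRange_one sr er,
    PySem.List.pyRange_one sc ec, ← hR, ← hC]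
  simp only [List.map_map, List.flatMap_map]
  have := core_decode sr sc R C
  simp only [Function.comp_def, PySem.Int.floordiv_natCast, PySem.Int.mod_natCast]
  rw [this]

theorem gen_coords_eq (sr sc er ec : Int) (rev : Bool) :
    gen_coords sr sc er ec rev = gen_coords_alt sr sc er ec rev := by
  cases rev
  · exact forward_eq sr sc er ec
  · -- reverse case: both sides are the reverse of the forward lists
    have hA : gen_coords sr sc er ec true = (gen_coords sr sc er ec false).reverse := by
      rw [genA_eq_flatMap, genA_eq_flatMap]
      simp [List.reverse_flatMap, List.map_reverse, Function.comp_def]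
    have hB : gen_coords_alt sr sc er ec true = (gen_coords_alt sr sc er ec false).reverse := by
      unfold gen_coords_alt
      simp [List.map_reverse]
    rw [hA, hB, forward_eq]

-- ===== VERDICT (by name: the statement is the Claim_ definition above) =====
theorem gen_coords_spec : Claim_equal_gen_coords := by
  intro sr sc er ec rev _
  unfold Spec_gen_coords
  exact gen_coords_eq sr sc er ec rev
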